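-- pv_equiv track=rewrite | github.com/xxubin04/algorithms | 프로그래머스/2/389479. 서버 증설 횟수/서버 증설 횟수.py | solution
-- ===== SOURCE A (Python) =====
-- def solution(players, m, k):
--     cnt = 0
--     valid_server = []  # 남은 시간들 저장
--
--     for p in players:
--         n = (p - (m * len(valid_server))) // m
--
--         for _ in range(n):
--             valid_server.append(k)
--             cnt += 1
--
--         s = 0
--         while s < len(valid_server):
--             valid_server[s] -= 1
--
--             if valid_server[0] == 0:
--                 valid_server.pop(0)
--             else:
--                 s += 1
--
--     return cnt
-- ===== SOURCE B (Python) =====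
-- def solution(players, m, k):
--     adds = []       # servers added per hour
--     active = 0      # servers counted by hour i's check (added in the last k-1 hours)
--     cnt = 0
--     for i, p in enumerate(players):
--         n = (p - m * active) // m
--         add = n if n > 0 else 0
--         adds.append(add)
--         cnt += add
--         active += add
--         if k > 0 and i - (k - 1) >= 0:
--             active -= adds[i - (k - 1)]
--     return cnt
-- ===== Notes on version B (the rewrite author's own statement) =====
-- stated objective: alternative
-- what changed: B drops A's per-server timer list (appended, decremented and popped element by element every hour) and instead keeps one sliding-window integer: servers added per hour are recorded once and the live-server count is updated by subtracting the expiring cohort, so the inner decrement/pop sweep over all live servers disappears.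
import Mathlib
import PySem

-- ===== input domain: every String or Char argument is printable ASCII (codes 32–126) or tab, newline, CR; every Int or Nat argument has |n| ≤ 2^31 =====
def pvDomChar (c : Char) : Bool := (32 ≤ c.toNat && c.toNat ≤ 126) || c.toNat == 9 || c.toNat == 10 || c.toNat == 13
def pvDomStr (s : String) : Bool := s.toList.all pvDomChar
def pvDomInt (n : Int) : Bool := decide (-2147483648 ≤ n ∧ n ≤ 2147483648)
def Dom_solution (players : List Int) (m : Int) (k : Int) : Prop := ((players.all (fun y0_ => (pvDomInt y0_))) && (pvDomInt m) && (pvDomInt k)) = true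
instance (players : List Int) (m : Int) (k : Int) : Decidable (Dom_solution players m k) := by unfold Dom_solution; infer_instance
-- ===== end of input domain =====

-- B replaces A's per-server timer-list simulation by a sliding-window count of the
-- servers added in the last k-1 hours, removing the per-hour decrement/pop sweep
-- (objective: alternative algorithm; return value proved equal for every m ≠ 0).


-- ===== PORT A =====
-- the inner 'while s < len(valid_server): valid_server[s] -= 1; if valid_server[0]==0: pop(0) else: s += 1'
def aSweep (s : Nat) (vs : List Int) : List Int :=
  if h : s < vs.length then
    let vs' := vs.set s (vs[s] - 1)
    if vs'[0]? = some 0 then aSweep s vs'.tail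
    else aSweep (s + 1) vs'
  else vs
termination_by vs.length - s
decreasing_by
  · simp only [List.length_tail, List.length_set]; omega
  · simp only [List.length_set]; omega

-- one outer iteration: n = (p - m*len(vs)) // m; append n servers of lifetime k; sweep
def aStep (m k : Int) (st : Int × List Int) (p : Int) : Int × List Int :=
  let n := PySem.Int.floordiv (p - m * (st.2.length : Int)) m
  let q := (PySem.List.pyRange 0 n 1).foldl (fun (q : List Int × Int) _ => (q.1 ++ [k], q.2 + 1)) (st.2, st.1)
  (q.2, aSweep 0 q.1)

def solution (players : List Int) (m : Int) (k : Int) : Int :=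
  (players.foldl (aStep m k) (0, [])).1

-- ===== PORT B =====
-- state (adds, active, cnt): per-hour additions, sliding-window count of live servers, total
def bStep (m k : Int) (st : List Int × Int × Int) (ip : Int × Int) : List Int × Int × Int :=
  let n := PySem.Int.floordiv (ip.2 - m * st.2.1) m
  let add := if 0 < n then n else 0
  let adds := st.1 ++ [add]
  let active := st.2.1 + add
  let active := if 0 < k ∧ 0 ≤ ip.1 - (k - 1) then active - ((PySem.List.pyGet? adds (ip.1 - (k - 1))).getD 0) else active
  (adds, active, st.2.2 + add)

def solution_alt (players : List Int) (m : Int) (k : Int) : Int :=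
  ((PySem.List.enumerate players 0).foldl (bStep m k) ([], 0, 0)).2.2

-- ===== PRECONDITION & SPEC =====
-- Pre_ excludes exactly m = 0, where Python A raises ZeroDivisionError ('// m').
def Pre_solution (players : List Int) (m : Int) (k : Int) : Prop := m ≠ 0
instance (players : List Int) (m : Int) (k : Int) : Decidable (Pre_solution players m k) := by unfold Pre_solution; infer_instance

def pvWitness_solution : List Int × Int × Int := ([1, 5, 2], 2, 3)

def Spec_solution (players : List Int) (m : Int) (k : Int) (out : Int) : Prop := out = solution_alt players m k
instance (players : List Int) (m : Int) (k : Int) (out : Int) : Decidable (Spec_solution players m k out) := by unfold Spec_solution; infer_instance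

-- ===== CLAIM (what is proved, stated in full; the proofs are below) =====
def Claim_equal_solution : Prop := ∀ (players : List Int) (m : Int) (k : Int), Dom_solution players m k → Pre_solution players m k → Spec_solution players m k (solution players m k)

-- ===== LEMMAS AND PROOFS =====

-- canonical shape of A's timer list: cohorts oldest first, the cohort c servers deep that
-- has w-many younger cohorts after it carries timer k - (w+1)
def canonW (k : Int) : List Int → List Int
  | [] => []
  | c :: w => List.replicate c.toNat (k - ((w.length : Int) + 1)) ++ canonW k w

-- the cohorts still alive after processing all of adds: the last k-1 of them (all, if k ≤ 0)
def window (k : Int) (adds : List Int) : List Int :=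
  if k ≤ 0 then adds else adds.drop (adds.length - (k - 1).toNat)

theorem sweep_phase2 (fuel : Nat) : ∀ (vs : List Int) (s : Nat), vs.length - s ≤ fuel → 1 ≤ s → vs[0]? ≠ some 0 →
    aSweep s vs = vs.take s ++ (vs.drop s).map (· - 1) := by
  induction fuel with
  | zero =>
    intro vs s hf hs h0
    rw [aSweep]
    have hlen : vs.length ≤ s := by omega
    simp [Nat.not_lt.mpr hlen, List.take_of_length_le hlen, List.drop_eq_nil_of_le hlen]
  | succ f ih =>
    intro vs s hf hs h0
    rw [aSweep]
    by_cases h : s < vs.length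
    · simp only [h, dif_pos]
      have h0' : (vs.set s (vs[s] - 1))[0]? = vs[0]? := by
        rw [List.getElem?_set_ne]; omega
      rw [if_neg (by rw [h0']; exact h0)]
      rw [ih (vs.set s (vs[s] - 1)) (s + 1) (by simp; omega) (by omega) (by rw [h0']; exact h0)]
      have hset : vs.set s (vs[s] - 1) = vs.take s ++ (vs[s] - 1) :: vs.drop (s + 1) := by
        rw [List.set_eq_take_append_cons_drop, if_pos h]
      have hlt : (vs.take s).length = s := by simp; omega
      rw [hset]
      have h1 : (vs.take s ++ (vs[s] - 1) :: vs.drop (s + 1)).take (s + 1)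
          = vs.take s ++ [vs[s] - 1] := by
        calc (vs.take s ++ (vs[s] - 1) :: vs.drop (s + 1)).take (s + 1)
            = (vs.take s ++ (vs[s] - 1) :: vs.drop (s + 1)).take ((vs.take s).length + 1) := by rw [hlt]
          _ = vs.take s ++ ((vs[s] - 1) :: vs.drop (s + 1)).take 1 := List.take_length_add_append 1
          _ = vs.take s ++ [vs[s] - 1] := by simp
      have h2 : (vs.take s ++ (vs[s] - 1) :: vs.drop (s + 1)).drop (s + 1) = vs.drop (s + 1) := by
        calc (vs.take s ++ (vs[s] - 1) :: vs.drop (s + 1)).drop (s + 1)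
            = (vs.take s ++ (vs[s] - 1) :: vs.drop (s + 1)).drop ((vs.take s).length + 1) := by rw [hlt]
          _ = ((vs[s] - 1) :: vs.drop (s + 1)).drop 1 := List.drop_length_add_append 1
          _ = vs.drop (s + 1) := by simp
      rw [h1, h2]
      have hd : List.drop s (List.map (fun x => x - 1) vs)
          = (vs[s] - 1) :: List.drop (s + 1) (List.map (fun x => x - 1) vs) := by
        rw [List.drop_eq_getElem_cons (by simp [h])]
        simp
      simp [hd]
    · simp only [h, dif_neg, not_false_iff]
      have hlen : vs.length ≤ s := by omega
      simp [List.take_of_length_le hlen, List.drop_eq_nil_of_le hlen]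

theorem sweep_main : ∀ vs : List Int, aSweep 0 vs = (vs.map (· - 1)).dropWhile (fun x => x == 0) := by
  intro vs
  induction vs with
  | nil => rw [aSweep]; simp
  | cons a t ih =>
    rw [aSweep]
    simp only [List.length_cons, Nat.succ_pos, dif_pos, List.getElem_cons_zero, List.set_cons_zero]
    by_cases ha : a - 1 = 0
    · rw [if_pos (by simp [ha])]
      simp only [List.tail_cons]
      rw [ih]
      simp [List.dropWhile, ha]
    · rw [if_neg (by simp [ha])]
      rw [sweep_phase2 (t.length) ((a - 1) :: t) 1 (by simp) (by omega) (by simp [ha])]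
      simp [List.dropWhile, ha]

theorem canonW_append (k a : Int) : ∀ u : List Int,
    canonW k (u ++ [a]) = (canonW k u).map (· - 1) ++ List.replicate a.toNat (k - 1) := by
  intro u
  induction u with
  | nil => simp [canonW]
  | cons c u ih =>
    simp only [List.cons_append, canonW, List.length_append, List.length_cons, List.length_nil,
      List.map_append, List.map_replicate, ih, List.append_assoc]
    congr 2
    push_cast
    ring

theorem mem_canonW (k : Int) : ∀ (w : List Int) (x : Int), x ∈ canonW k w →
    k - (w.length : Int) ≤ x ∧ x ≤ k - 1 := by
  intro w
  induction w with
  | nil => intro x hx; simp [canonW] at hx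
  | cons c w ih =>
    intro x hx
    simp only [canonW, List.mem_append, List.mem_replicate] at hx
    rcases hx with ⟨-, rfl⟩ | hx
    · constructor <;> [simp; skip] <;> push_cast <;> omega
    · have := ih x hx
      simp only [List.length_cons]
      push_cast
      omega

theorem len_canonW (k : Int) : ∀ w : List Int, (∀ x ∈ w, 0 ≤ x) →
    ((canonW k w).length : Int) = w.sum := by
  intro w
  induction w with
  | nil => simp [canonW]
  | cons c w ih =>
    intro h
    simp only [canonW, List.length_append, List.length_replicate, List.sum_cons]
    push_cast
    rw [ih (fun x hx => h x (List.mem_cons_of_mem _ hx)),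
      Int.toNat_of_nonneg (h c (List.mem_cons_self ..))]

theorem dropWhile_all_ne (p : Int → Bool) : ∀ l : List Int, (∀ x ∈ l, ¬ p x) → l.dropWhile p = l := by
  intro l h
  cases l with
  | nil => rfl
  | cons x t => simp [List.dropWhile, h x (List.mem_cons_self ..)]

theorem dropWhile_replicate_true (p : Int → Bool) (z : Int) (hz : p z) (n : Nat) :
    (List.replicate n z).dropWhile p = [] := by
  induction n with
  | zero => rfl
  | succ n ih => simp [List.replicate_succ, List.dropWhile, hz, ih]

theorem dropWhile_replicate_append (p : Int → Bool) (z : Int) (hz : p z) (n : Nat) (l : List Int) :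
    (List.replicate n z ++ l).dropWhile p = l.dropWhile p := by
  induction n with
  | zero => simp
  | succ n ih => simp [List.replicate_succ, List.dropWhile, hz, ih]

-- the heart: one hour of A's simulation, started from the canonical list, lands on the
-- canonical list of the extended addition history
theorem canon_step (k a : Int) (adds : List Int) (ha : 0 ≤ a) :
    canonW k (window k (adds ++ [a]))
      = ((canonW k (window k adds) ++ List.replicate a.toNat k).map (· - 1)).dropWhile (fun x => x == 0) := by
  by_cases hk : k ≤ 0
  · simp only [window, if_pos hk]
    rw [canonW_append, List.map_append, List.map_replicate]
    rw [dropWhile_all_ne]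
    intro x hx
    rcases List.mem_append.1 hx with hx | hx
    · obtain ⟨y, hy, rfl⟩ := List.mem_map.1 hx
      have hb := mem_canonW k adds y hy
      simp only [beq_iff_eq]
      omega
    · have := List.eq_of_mem_replicate hx
      subst this
      simp only [beq_iff_eq]
      omega
  · push_neg at hk
    have hK1 : ((k - 1).toNat : Int) = k - 1 := Int.toNat_of_nonneg (by omega)
    by_cases hle : (k - 1).toNat ≤ adds.length
    · by_cases h0 : (k - 1).toNat = 0
      · have hk1 : k = 1 := by omega
        have d0 : adds.length - (k - 1).toNat = adds.length := by omega
        have d1 : adds.length + 1 - (k - 1).toNat = adds.length + 1 := by omega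
        simp only [window, if_neg (by omega : ¬ k ≤ 0), List.length_append, List.length_cons,
          List.length_nil, d0, d1]
        rw [List.drop_length, show adds.length + 1 = (adds ++ [a]).length by simp, List.drop_length]
        simp only [canonW, List.nil_append, List.map_replicate, hk1]
        rw [show (1 : Int) - 1 = 0 by ring, dropWhile_replicate_true _ _ (by simp)]
      · have h1 : 1 ≤ (k - 1).toNat := by omega
        have hlt : adds.length - (k - 1).toNat < adds.length := by omega
        have hdrop' : adds.length + 1 - (k - 1).toNat = (adds.length - (k - 1).toNat) + 1 := by omega
        simp only [window, if_neg (by omega : ¬ k ≤ 0), List.length_append, List.length_cons,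
          List.length_nil, hdrop']
        rw [List.drop_append_of_le_length (by omega)]
        rw [List.drop_eq_getElem_cons hlt]
        have hw1len : ((adds.drop (adds.length - (k - 1).toNat + 1)).length : Int) = k - 2 := by
          rw [List.length_drop]
          omega
        rw [canonW_append]
        simp only [canonW, hw1len]
        rw [show k - ((k : Int) - 2 + 1) = 1 by ring]
        rw [List.append_assoc, List.map_append, List.map_replicate,
          show (1 : Int) - 1 = 0 by ring]
        rw [dropWhile_replicate_append _ _ (by simp)]
        rw [List.map_append, List.map_replicate]
        rw [dropWhile_all_ne]
        intro x hx
        rcases List.mem_append.1 hx with hx | hx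
        · obtain ⟨y, hy, rfl⟩ := List.mem_map.1 hx
          have hb := mem_canonW k _ y hy
          rw [hw1len] at hb
          simp only [beq_iff_eq]
          omega
        · have := List.eq_of_mem_replicate hx
          subst this
          simp only [beq_iff_eq]
          omega
    · have d0 : adds.length - (k - 1).toNat = 0 := by omega
      have d1 : adds.length + 1 - (k - 1).toNat = 0 := by omega
      simp only [window, if_neg (by omega : ¬ k ≤ 0), List.length_append, List.length_cons,
        List.length_nil, d0, d1, List.drop_zero]
      rw [canonW_append, List.map_append, List.map_replicate]
      rw [dropWhile_all_ne]
      intro x hx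
      rcases List.mem_append.1 hx with hx | hx
      · obtain ⟨y, hy, rfl⟩ := List.mem_map.1 hx
        have hb := mem_canonW k adds y hy
        simp only [beq_iff_eq]
        omega
      · have := List.eq_of_mem_replicate hx
        subst this
        simp only [beq_iff_eq]
        omega

-- one hour of B's window-sum bookkeeping equals the sum over the new window
theorem wsum_step (k a : Int) (adds : List Int) :
    (window k (adds ++ [a])).sum
      = (window k adds).sum + a
        - (if 0 < k ∧ 0 ≤ (adds.length : Int) - (k - 1)
           then (PySem.List.pyGet? (adds ++ [a]) ((adds.length : Int) - (k - 1))).getD 0 else 0) := by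
  by_cases hk : k ≤ 0
  · rw [if_neg (by omega)]
    simp [window, hk]
  · push_neg at hk
    have hK1 : ((k - 1).toNat : Int) = k - 1 := Int.toNat_of_nonneg (by omega)
    by_cases hc : 0 ≤ (adds.length : Int) - (k - 1)
    · rw [if_pos ⟨hk, hc⟩]
      have hle : (k - 1).toNat ≤ adds.length := by omega
      have hidx : (adds.length : Int) - (k - 1) = ((adds.length - (k - 1).toNat : Nat) : Int) := by
        push_cast; omega
      rw [hidx, PySem.List.pyGet?_natCast]
      by_cases h0 : (k - 1).toNat = 0
      · have ht : adds.length - (k - 1).toNat = adds.length := by omega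
        have ht1 : adds.length + 1 - (k - 1).toNat = adds.length + 1 := by omega
        simp only [window, if_neg (by omega : ¬ k ≤ 0), List.length_append, List.length_cons,
          List.length_nil, ht, ht1]
        simp
      · have h1 : 1 ≤ (k - 1).toNat := by omega
        have hlt : adds.length - (k - 1).toNat < adds.length := by omega
        have hget : (adds ++ [a])[adds.length - (k - 1).toNat]? = some adds[adds.length - (k - 1).toNat] := by
          rw [List.getElem?_append_left hlt, List.getElem?_eq_getElem hlt]
        have hdrop' : adds.length + 1 - (k - 1).toNat = (adds.length - (k - 1).toNat) + 1 := by omega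
        simp only [window, if_neg (by omega : ¬ k ≤ 0), List.length_append, List.length_cons,
          List.length_nil, hdrop', hget]
        rw [List.drop_append_of_le_length (by omega)]
        conv_rhs => rw [List.drop_eq_getElem_cons hlt, List.sum_cons]
        rw [List.sum_append]
        simp only [List.sum_cons, List.sum_nil, Option.getD_some]
        ring
    · rw [if_neg (by tauto)]
      have ht : adds.length - (k - 1).toNat = 0 := by omega
      have ht1 : adds.length + 1 - (k - 1).toNat = 0 := by omega
      simp only [window, if_neg (by omega : ¬ k ≤ 0), List.length_append, List.length_cons,
        List.length_nil, ht, ht1]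
      simp

theorem rangefold (k : Int) : ∀ (l : List Int) (vs : List Int) (c : Int),
    l.foldl (fun (q : List Int × Int) _ => (q.1 ++ [k], q.2 + 1)) (vs, c)
      = (vs ++ List.replicate l.length k, c + (l.length : Int)) := by
  intro l
  induction l with
  | nil => simp
  | cons x t ih =>
    intro vs c
    simp only [List.foldl_cons, ih, List.length_cons, Prod.mk.injEq]
    constructor
    · simp [List.replicate_succ]
    · push_cast; ring

theorem invariant (m k : Int) : ∀ players : List Int,
    ((PySem.List.enumerate players 0).foldl (bStep m k) ([], 0, 0)).1.length = players.length
    ∧ (∀ x ∈ ((PySem.List.enumerate players 0).foldl (bStep m k) ([], 0, 0)).1, 0 ≤ x)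
    ∧ (players.foldl (aStep m k) (0, [])).1 = ((PySem.List.enumerate players 0).foldl (bStep m k) ([], 0, 0)).2.2
    ∧ ((PySem.List.enumerate players 0).foldl (bStep m k) ([], 0, 0)).2.1
        = (window k ((PySem.List.enumerate players 0).foldl (bStep m k) ([], 0, 0)).1).sum
    ∧ (players.foldl (aStep m k) (0, [])).2
        = canonW k (window k ((PySem.List.enumerate players 0).foldl (bStep m k) ([], 0, 0)).1) := by
  intro players
  induction players using List.reverseRecOn with
  | nil =>
    refine ⟨rfl, by simp, rfl, ?_, ?_⟩ <;> simp [window, canonW]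
  | append_singleton xs p ih =>
    obtain ⟨hlen, hpos, hcnt, hact, hvs⟩ := ih
    rw [PySem.List.enumerate_append, List.foldl_append, List.foldl_append]
    simp only [PySem.List.enumerate_cons, PySem.List.enumerate_nil, List.foldl_cons,
      List.foldl_nil, zero_add]
    set st := (PySem.List.enumerate xs 0).foldl (bStep m k) ([], 0, 0) with hst
    set sa := xs.foldl (aStep m k) (0, []) with hsa
    have hwpos : ∀ x ∈ window k st.1, 0 ≤ x := by
      unfold window
      split
      · exact hpos
      · intro x hx; exact hpos x (List.mem_of_mem_drop hx)
    have hlvs : ((sa.2.length : Nat) : Int) = st.2.1 := by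
      rw [hvs, len_canonW k _ hwpos, hact]
    set n := PySem.Int.floordiv (p - m * st.2.1) m with hndef
    set add := if 0 < n then n else 0 with hadddef
    have htn : ((n.toNat : Nat) : Int) = add := by
      rw [hadddef]; split <;> omega
    have hapos : 0 ≤ add := by rw [hadddef]; split <;> omega
    have hatn : add.toNat = n.toNat := by rw [hadddef]; split <;> omega
    have hA : aStep m k sa p
        = (sa.1 + (n.toNat : Int), aSweep 0 (sa.2 ++ List.replicate n.toNat k)) := by
      simp only [aStep, hlvs, ← hndef, rangefold, PySem.List.length_pyRange_one, Int.sub_zero]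
    have hB : bStep m k st ((xs.length : Int), p)
        = (st.1 ++ [add], (if 0 < k ∧ 0 ≤ (xs.length : Int) - (k - 1)
            then st.2.1 + add - ((PySem.List.pyGet? (st.1 ++ [add]) ((xs.length : Int) - (k - 1))).getD 0)
            else st.2.1 + add), st.2.2 + add) := by
      simp only [bStep, ← hndef, ← hadddef]
    refine ⟨?_, ?_, ?_, ?_, ?_⟩
    · rw [hB]; simp [hlen]
    · rw [hB]
      intro x hx
      rcases List.mem_append.1 hx with hx | hx
      · exact hpos x hx
      · rw [List.mem_singleton.1 hx]; exact hapos
    · rw [hA, hB, hcnt, htn]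
    · rw [hB]
      have hw := wsum_step k add st.1
      rw [hact]
      rw [hlen] at hw
      split
      · rw [hw, if_pos (by assumption)]
      · rw [hw, if_neg (by assumption)]; ring
    · rw [hA, hB]
      simp only
      rw [hvs, ← hatn, sweep_main, canon_step k add st.1 hapos]

-- ===== VERDICT (by name: the statement is the Claim_ definition above) =====
theorem solution_spec : Claim_equal_solution := by
  intro players m k _ _
  unfold Spec_solution solution solution_alt
  have h := invariant m k players
  exact h.2.2.1
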